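-- pv_equiv track=rewrite | github.com/bmarchand/auto-dp | workflow/scripts/utils.py | read_td_lines
-- ===== SOURCE A (Python) =====
-- def read_td_lines(lines):
--
--     # extracting bags and tree from td file
--     index2bag = {}
--     adj = {}
--
--     started_bs = False
--
--     for line in lines:
--         if line[0]=='b':
--             started_bs = True
--             index2bag[line.split(' ')[1].replace('-','_')] = [vertex.rstrip('\n') for vertex in line.split(' ')[2:-1]]
--
--         else:
--             if started_bs:
--                 i = line.split(' ')[0].replace('-','_')
--                 j = line.split(' ')[1].rstrip('\n').replace('-','_')
--                 try:
--                     adj[i].append(j)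
--                 except KeyError:
--                     adj[i] = [j]
--                 try:
--                     adj[j].append(i)
--                 except KeyError:
--                     adj[j] = [i]
--
--     return adj, index2bag
-- ===== SOURCE B (Python) =====
-- def read_td_lines(lines):
--     # bags: one comprehension over the bag lines
--     index2bag = {
--         line.split(' ')[1].replace('-', '_'):
--             [v.rstrip('\n') for v in line.split(' ')[2:-1]]
--         for line in lines if line[0] == 'b'
--     }
--     # position of the first bag line (edge lines before it are dropped by the format)
--     first = next((p for p, line in enumerate(lines) if line[0] == 'b'), len(lines))
--     # flatten every edge line after it into directed occurrences (i,j) and (j,i)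
--     occ = []
--     for line in lines[first + 1:]:
--         if line[0] != 'b':
--             parts = line.split(' ')
--             i = parts[0].replace('-', '_')
--             j = parts[1].rstrip('\n').replace('-', '_')
--             occ.append((i, j))
--             occ.append((j, i))
--     # group the occurrences: distinct keys in first-appearance order, each paired
--     # with all its neighbours in occurrence order
--     adj = {k: [v for k2, v in occ if k2 == k]
--            for k in dict.fromkeys(k2 for k2, _ in occ)}
--     return adj, index2bag
-- ===== Notes on version B (the rewrite author's own statement) =====
-- stated objective: alternative
-- what changed: Instead of A's single flagged pass that appends into adjacency dicts via try/except, B locates the first bag line by index, flattens the later edge lines into a list of directed (key, neighbour) occurrences, and then builds adj by a group-by: distinct keys in first-appearance order, each paired with the list of its neighbours filtered from the occurrence list; bags come from a separate dict comprehension.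
import Mathlib
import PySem

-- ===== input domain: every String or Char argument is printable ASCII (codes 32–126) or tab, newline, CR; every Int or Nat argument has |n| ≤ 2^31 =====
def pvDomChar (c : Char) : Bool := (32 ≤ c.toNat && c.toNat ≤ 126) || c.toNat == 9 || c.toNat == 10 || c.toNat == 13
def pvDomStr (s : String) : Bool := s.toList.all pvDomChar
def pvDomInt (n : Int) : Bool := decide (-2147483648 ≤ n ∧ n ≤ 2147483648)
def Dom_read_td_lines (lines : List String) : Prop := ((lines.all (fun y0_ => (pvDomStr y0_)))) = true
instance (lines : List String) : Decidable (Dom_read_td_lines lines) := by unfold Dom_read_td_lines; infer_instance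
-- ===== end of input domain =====

-- B replaces A's single flagged pass with try/except dict-appends by: find the first bag
-- line, flatten the later edge lines into directed (key, neighbour) occurrences, and build
-- adj by a group-by over that occurrence list (objective: alternative, not faster).

-- ===== PORT A =====
-- shared primitives (both Pythons contain the same sub-expressions)
-- line[0] == 'b' test on a possibly empty line (none = IndexError, excluded by Pre_)
def pvIsB (line : String) : Bool := PySem.Str.pyGet? line 0 == some 'b'
-- line.split(' '): sep ≠ "" so split? is always some; exact
def pvSplit (s : String) : List String := (PySem.Str.split? s " ").getD []
-- s.rstrip('\n'): drop trailing '\n' chars only (hand port, exact: rstrip with an explicit char set)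
def pvRstripNl (s : String) : String := String.ofList ((s.toList.reverse.dropWhile (fun c => c == '\n')).reverse)
-- line.split(' ')[1].replace('-','_')  ([1] exists under Pre_; getD "" only where Python raises)
def pvKey (line : String) : String := PySem.Str.replace ((PySem.List.pyGet? (pvSplit line) 1).getD "") "-" "_"
-- [vertex.rstrip('\n') for vertex in line.split(' ')[2:-1]]
def pvBag (line : String) : List String := (PySem.List.slice (pvSplit line) (some 2) (some (-1))).map pvRstripNl
-- line.split(' ')[0].replace('-','_')
def pvEdgeI (line : String) : String := PySem.Str.replace ((PySem.List.pyGet? (pvSplit line) 0).getD "") "-" "_"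
-- line.split(' ')[1].rstrip('\n').replace('-','_')
def pvEdgeJ (line : String) : String := PySem.Str.replace (pvRstripNl ((PySem.List.pyGet? (pvSplit line) 1).getD "")) "-" "_"

-- A's loop body: state (started_bs, index2bag, adj); try/except append ≙ Dict.modify _ [] (· ++ [_])
def pvStepA (st : Bool × PySem.Dict String (List String) × PySem.Dict String (List String))
    (line : String) : Bool × PySem.Dict String (List String) × PySem.Dict String (List String) :=
  if pvIsB line then
    (true, st.2.1.insert (pvKey line) (pvBag line), st.2.2)
  else if st.1 then
    (st.1, st.2.1, ((st.2.2.modify (pvEdgeI line) [] (· ++ [pvEdgeJ line])).modify (pvEdgeJ line) [] (· ++ [pvEdgeI line])))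
  else st

def read_td_lines (lines : List String) : (List (String × List String)) × (List (String × List String)) :=
  let r := lines.foldl pvStepA (false, PySem.Dict.empty, PySem.Dict.empty)
  (r.2.2.items, r.2.1.items)

-- ===== PORT B =====
-- B's occurrence-collecting loop body: occ.append((i,j)); occ.append((j,i))
def pvOccStep (occ : List (String × String)) (line : String) : List (String × String) :=
  if pvIsB line then occ
  else occ ++ [(pvEdgeI line, pvEdgeJ line), (pvEdgeJ line, pvEdgeI line)]

def read_td_lines_alt (lines : List String) : (List (String × List String)) × (List (String × List String)) :=
  -- dict comprehension over the 'b' lines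
  let i2b := (lines.filter pvIsB).foldl (fun d line => d.insert (pvKey line) (pvBag line)) PySem.Dict.empty
  -- first = next((p for p, line in enumerate(lines) if line[0] == 'b'), len(lines))
  let first := lines.findIdx pvIsB
  -- for line in lines[first + 1:]: … occ.append …
  let occ := (PySem.List.slice lines (some ((first : Int) + 1))).foldl pvOccStep []
  -- adj = {k: [v for k2, v in occ if k2 == k] for k in dict.fromkeys(k2 for k2, _ in occ)}
  let adj := (PySem.List.dedup (occ.map Prod.fst)).foldl
      (fun d k => d.insert k ((occ.filter (fun p => p.1 == k)).map (·.2))) PySem.Dict.empty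
  (adj.items, i2b.items)

-- ===== PRECONDITION & SPEC =====
-- Pre_ excludes exactly the inputs where the Python A raises IndexError: an empty line
-- (line[0]), a 'b' line with no space (split(' ')[1]), or a spaceless non-'b' line at or
-- after the first 'b' line (split(' ')[1]).
def Pre_read_td_lines (lines : List String) : Prop :=
  (∀ l ∈ lines, l ≠ "" ∧ (pvIsB l = true → PySem.Str.isIn " " l = true)) ∧
  (∀ l ∈ lines.dropWhile (fun l => !(pvIsB l)), pvIsB l = false → PySem.Str.isIn " " l = true)
instance (lines : List String) : Decidable (Pre_read_td_lines lines) := by unfold Pre_read_td_lines; infer_instance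

def pvWitness_read_td_lines : List String := ["1 2", "b 1 4 -5 ", "1 2", "b 2 6 7 ", "2 3"]

def Spec_read_td_lines (lines : List String) (out : (List (String × List String)) × (List (String × List String))) : Prop := out = read_td_lines_alt lines
instance (lines : List String) (out : (List (String × List String)) × (List (String × List String))) : Decidable (Spec_read_td_lines lines out) := by unfold Spec_read_td_lines; infer_instance

-- ===== CLAIM (what is proved, stated in full; the proofs are below) =====
def Claim_equal_read_td_lines : Prop := ∀ (lines : List String), Dom_read_td_lines lines → Pre_read_td_lines lines → Spec_read_td_lines lines (read_td_lines lines)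

-- ===== LEMMAS AND PROOFS =====

-- proof-level helper: A's edge handling once started_bs is true, as a standalone fold body
def pvStepB (d : PySem.Dict String (List String)) (line : String) : PySem.Dict String (List String) :=
  if pvIsB line then d
  else (d.modify (pvEdgeI line) [] (· ++ [pvEdgeJ line])).modify (pvEdgeJ line) [] (· ++ [pvEdgeI line])

-- once started_bs is true, A's fold splits into the bag fold and the pvStepB fold
theorem foldA_started (rest : List String) (d1 d2 : PySem.Dict String (List String)) :
    rest.foldl pvStepA (true, d1, d2)
      = (true, (rest.filter pvIsB).foldl (fun d line => d.insert (pvKey line) (pvBag line)) d1,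
         rest.foldl pvStepB d2) := by
  induction rest generalizing d1 d2 with
  | nil => rfl
  | cons l t ih =>
      by_cases h : pvIsB l = true
      · simp [pvStepA, pvStepB, h, ih]
      · simp [pvStepA, pvStepB, h, ih]

-- before the first 'b' line, A's fold does nothing
theorem foldA_prefix (pre : List String) (h : ∀ l ∈ pre, pvIsB l = false) :
    pre.foldl pvStepA (false, (PySem.Dict.empty : PySem.Dict String (List String)),
      (PySem.Dict.empty : PySem.Dict String (List String)))
      = (false, PySem.Dict.empty, PySem.Dict.empty) := by
  induction pre with
  | nil => rfl
  | cons l t ih =>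
      have hl : pvIsB l = false := h l (by simp)
      simp only [List.foldl_cons, pvStepA, hl]
      simp only [Bool.false_eq_true, if_false]
      exact ih (fun x hx => h x (by simp [hx]))

-- B's occurrence accumulator is append-only
theorem occ_acc (t : List String) (occ0 : List (String × String)) :
    t.foldl pvOccStep occ0 = occ0 ++ t.foldl pvOccStep [] := by
  induction t generalizing occ0 with
  | nil => simp
  | cons l t ih =>
      simp only [List.foldl_cons, pvOccStep]
      by_cases h : pvIsB l = true
      · simp only [h, if_true]; exact ih occ0
      · simp only [h, Bool.false_eq_true, if_false, List.nil_append]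
        rw [ih, ih [(pvEdgeI l, pvEdgeJ l), (pvEdgeJ l, pvEdgeI l)], List.append_assoc]

-- A's edge fold equals the modify-fold over B's occurrence list
theorem foldB_eq_occ (t : List String) (d : PySem.Dict String (List String)) :
    t.foldl pvStepB d
      = (t.foldl pvOccStep []).foldl (fun d p => d.modify p.1 [] (· ++ [p.2])) d := by
  induction t generalizing d with
  | nil => rfl
  | cons l t ih =>
      simp only [List.foldl_cons, pvStepB, pvOccStep]
      by_cases h : pvIsB l = true
      · simp only [h, if_true]; exact ih d
      · simp only [h, Bool.false_eq_true, if_false, List.nil_append]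
        rw [ih, occ_acc t [(pvEdgeI l, pvEdgeJ l), (pvEdgeJ l, pvEdgeI l)], List.foldl_append]
        rfl

-- next(enumerate…) with default len(lines) ≙ findIdx; drop past it ≙ dropWhile
theorem findIdx_takeWhile (p : String → Bool) (l : List String) :
    l.findIdx p = (l.takeWhile (fun x => !p x)).length := by
  induction l with
  | nil => rfl
  | cons a t ih =>
      by_cases h : p a
      · simp [List.findIdx_cons, h]
      · simp [List.findIdx_cons, h, ih]

theorem pv_drop_len_takeWhile (p : String → Bool) (l : List String) :
    l.drop (l.takeWhile p).length = l.dropWhile p := by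
  induction l with
  | nil => rfl
  | cons a t ih =>
      by_cases h : p a
      · simpa [List.takeWhile_cons, List.dropWhile_cons, h] using ih
      · simp [h]

-- GROUPING: the modify-fold over an occurrence list has exactly B's group-by items
theorem items_group (occ : List (String × String)) :
    ((occ.foldl (fun d p => d.modify p.1 [] (· ++ [p.2])) (PySem.Dict.empty : PySem.Dict String (List String))).items)
      = ((PySem.List.dedup (occ.map Prod.fst)).foldl
          (fun d k => d.insert k ((occ.filter (fun p => p.1 == k)).map (·.2)))
          (PySem.Dict.empty : PySem.Dict String (List String))).items := by
  have hkeys : (occ.foldl (fun d p => d.modify p.1 [] (· ++ [p.2])) (PySem.Dict.empty : PySem.Dict String (List String))).keys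
      = PySem.Set.ofList (occ.map Prod.fst) := by
    rw [PySem.Dict.keys_foldl_modify_key occ Prod.fst [] (fun _ p => (· ++ [p.2]))]
    simp [PySem.Set.update_nil_left]
  have hnd : (occ.foldl (fun d p => d.modify p.1 [] (· ++ [p.2])) (PySem.Dict.empty : PySem.Dict String (List String))).keys.Nodup := by
    rw [hkeys]; exact PySem.Set.nodup_ofList _
  rw [PySem.Dict.items_eq_map_keys _ hnd []]
  have hins := PySem.Dict.items_foldl_insert_fresh (PySem.List.dedup (occ.map Prod.fst)) id
    (fun k => (occ.filter (fun p => p.1 == k)).map (·.2))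
    (PySem.Dict.empty : PySem.Dict String (List String))
    (by intro a _; simp [PySem.Dict.contains_empty])
    (by simp only [List.map_id]; exact PySem.Set.nodup_ofList (occ.map Prod.fst))
  simp only [id_eq] at hins
  have hempty : (PySem.Dict.empty : PySem.Dict String (List String)).items = [] := rfl
  have hded : PySem.List.dedup (occ.map Prod.fst) = PySem.Set.ofList (occ.map Prod.fst) := rfl
  rw [hins, hempty, List.nil_append, hkeys, hded]
  apply List.map_congr_left
  intro k _
  rw [PySem.Dict.getD_foldl_modify_append occ PySem.Dict.empty k]
  simp [PySem.Dict.getD_empty]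

-- ===== VERDICT (by name: the statement is the Claim_ definition above) =====
theorem read_td_lines_spec : Claim_equal_read_td_lines := by
  intro lines _ _
  unfold Spec_read_td_lines read_td_lines read_td_lines_alt
  dsimp only
  have hsplit := (List.takeWhile_append_dropWhile (p := fun l => !(pvIsB l)) (l := lines)).symm
  have hpre : ∀ l ∈ lines.takeWhile (fun l => !(pvIsB l)), pvIsB l = false := by
    intro l hl
    have := List.mem_takeWhile_imp hl
    simpa using this
  have hslice : PySem.List.slice lines (some ((lines.findIdx pvIsB : Int) + 1))
      = (lines.dropWhile (fun l => !(pvIsB l))).drop 1 := by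
    rw [PySem.List.slice_from _ (by positivity)]
    rw [findIdx_takeWhile]
    have ht : ((((lines.takeWhile (fun l => !(pvIsB l))).length : Int) + 1)).toNat
        = (lines.takeWhile (fun l => !(pvIsB l))).length + 1 := by omega
    rw [ht, ← List.drop_drop, pv_drop_len_takeWhile]
  rw [hslice, hsplit, List.foldl_append, List.filter_append]
  rw [foldA_prefix _ hpre]
  have hfilpre : (lines.takeWhile (fun l => !(pvIsB l))).filter pvIsB = [] := by
    rw [List.filter_eq_nil_iff]
    intro l hl
    simp [hpre l hl]
  rw [hfilpre, List.nil_append]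
  cases hrest : lines.dropWhile (fun l => !(pvIsB l)) with
  | nil =>
      have h0 : (List.takeWhile (fun l => !pvIsB l) lines).dropWhile (fun l => !pvIsB l) = [] := by
        rw [List.dropWhile_eq_nil_iff]
        intro x hx
        simp [hpre x hx]
      simp [h0]
  | cons b t =>
      have hb : pvIsB b = true := by
        have := List.head_dropWhile_not (p := fun l => !(pvIsB l)) (l := lines) (by simp [hrest])
        simp [hrest] at this
        simpa using this
      simp only [List.foldl_cons, List.filter_cons, pvStepA, hb, if_true, foldA_started]
      rw [← hrest, ← hsplit, hrest]
      simp only [List.drop_one, List.tail_cons]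
      rw [foldB_eq_occ, items_group]
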